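-- pv_equiv track=rewrite | github.com/FantariaW/Python-Practice | CS50P課程練習/Arivia_Daily_Review/Arivia_Day4_6_advanced_dict_list.py | count_activity
-- ===== SOURCE A (Python) =====
-- def count_activity(activity_list):
--     count_act_dict = {}  # 📋 紀錄每種活動有幾個人參加
--
--     for activity_dict in activity_list:
--         activity_key_name = activity_dict["Activity"].strip().title()  # 🧼 處理活動名稱格式
--         if activity_key_name in count_act_dict:
--             count_act_dict[activity_key_name] += 1     # ➕ 已出現則人數 +1
--         else:
--             count_act_dict[activity_key_name] = 1      # 🌱 第一次出現，從 1 開始計算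
--
--     return count_act_dict  # 🎁 回傳每種活動的人數統計
-- ===== SOURCE B (Python) =====
-- def count_activity(activity_list):
--     # Two-pass: normalize all names once, then pair each first-seen distinct
--     # name with its total count (no incremental tally dict).
--     names = [d["Activity"].strip().title() for d in activity_list]
--     return {n: names.count(n) for n in dict.fromkeys(names)}
-- ===== Notes on version B (the rewrite author's own statement) =====
-- stated objective: simpler
-- what changed: B replaces A's incremental tally dict with a two-pass comprehension: normalize all names into a list, dedup it in first-seen order with dict.fromkeys, and pair each distinct name with names.count(n).
import Mathlib
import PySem

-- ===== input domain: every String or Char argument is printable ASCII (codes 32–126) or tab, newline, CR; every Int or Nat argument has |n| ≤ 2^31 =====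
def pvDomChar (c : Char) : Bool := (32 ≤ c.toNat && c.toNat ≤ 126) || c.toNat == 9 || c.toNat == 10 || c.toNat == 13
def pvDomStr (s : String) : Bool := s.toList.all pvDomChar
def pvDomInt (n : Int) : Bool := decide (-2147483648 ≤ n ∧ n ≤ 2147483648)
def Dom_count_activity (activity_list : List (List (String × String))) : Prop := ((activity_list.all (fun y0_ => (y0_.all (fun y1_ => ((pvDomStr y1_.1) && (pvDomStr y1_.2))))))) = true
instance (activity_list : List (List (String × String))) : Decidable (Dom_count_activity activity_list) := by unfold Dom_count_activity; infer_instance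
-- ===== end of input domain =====

-- B counts per activity with a two-pass dedup + count comprehension instead of A's incremental tally dict; objective: simpler.


-- hand port of str.title(): a letter is uppercased after a non-letter, lowercased after a letter
-- (exact on the ASCII domain, where 'cased' coincides with isalpha)
def pyTitleGo (cs : List Char) (prevAlpha : Bool) : List Char :=
  match cs with
  | [] => []
  | c :: rest =>
      (if PySem.Chars.isalpha c then
        (if prevAlpha then PySem.Chars.lowerChar c else PySem.Chars.upperChar c)
       else c) :: pyTitleGo rest (PySem.Chars.isalpha c)

def pyTitle (s : String) : String := String.mk (pyTitleGo s.toList false)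

-- d["Activity"].strip().title()  (lookup under Pre_; "" outside it)
def activityKey (d : List (String × String)) : String :=
  pyTitle (PySem.Str.strip ((PySem.Dict.mk d).getD "Activity" ""))

-- ===== PORT A =====
def count_activity (activity_list : List (List (String × String))) : List (String × Int) :=
  (activity_list.foldl
    (fun count_act_dict activity_dict =>
      let activity_key_name := activityKey activity_dict
      if count_act_dict.contains activity_key_name then
        count_act_dict.insert activity_key_name (count_act_dict.getD activity_key_name 0 + 1)
      else
        count_act_dict.insert activity_key_name 1)
    PySem.Dict.empty).items

-- ===== PORT B =====
def count_activity_alt (activity_list : List (List (String × String))) : List (String × Int) :=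
  let names := activity_list.map activityKey
  (PySem.List.dedup names).map (fun n => (n, (names.count n : Int)))

-- ===== PRECONDITION & SPEC =====
-- Pre_ excludes exactly the inputs where Python A raises KeyError: a dict lacking the "Activity" key.
def Pre_count_activity (activity_list : List (List (String × String))) : Prop :=
  ∀ d ∈ activity_list, (PySem.Dict.mk d).contains "Activity" = true
instance (activity_list : List (List (String × String))) : Decidable (Pre_count_activity activity_list) := by unfold Pre_count_activity; infer_instance
def pvWitness_count_activity : (List (List (String × String))) := [[("Activity", " yoga ")], [("Activity", "Yoga")]]

def Spec_count_activity (activity_list : List (List (String × String))) (out : List (String × Int)) : Prop := out = count_activity_alt activity_list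
instance (activity_list : List (List (String × String))) (out : List (String × Int)) : Decidable (Spec_count_activity activity_list out) := by unfold Spec_count_activity; infer_instance

-- ===== CLAIM (what is proved, stated in full; the proofs are below) =====
def Claim_equal_count_activity : Prop := ∀ (activity_list : List (List (String × String))), Dom_count_activity activity_list → Pre_count_activity activity_list → Spec_count_activity activity_list (count_activity activity_list)

-- ===== LEMMAS AND PROOFS =====
-- A's loop body, on an already-extracted key, is the Counter step
lemma count_activity_step (d : PySem.Dict String Int) (k : String) :
    (if d.contains k then d.insert k (d.getD k 0 + 1) else d.insert k 1) =
      d.insert k (d.getD k 0 + 1) := by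
  by_cases h : d.contains k = true
  · simp [h]
  · simp only [Bool.not_eq_true] at h
    simp [h, PySem.Dict.getD_of_not_contains (d := d) (k := k) (d0 := (0:Int)) h]

-- ===== VERDICT (by name: the statement is the Claim_ definition above) =====
theorem count_activity_spec : Claim_equal_count_activity := by
  intro l _ _
  show count_activity l = count_activity_alt l
  unfold count_activity count_activity_alt
  simp only []
  rw [show (fun (count_act_dict : PySem.Dict String Int) activity_dict =>
        let activity_key_name := activityKey activity_dict;
        if count_act_dict.contains activity_key_name = true then
          count_act_dict.insert activity_key_name (count_act_dict.getD activity_key_name 0 + 1)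
        else count_act_dict.insert activity_key_name 1) =
      (fun d activity_dict => (fun (d : PySem.Dict String Int) x =>
        if d.contains x = true then d.insert x (d.getD x 0 + 1) else d.insert x 1) d (activityKey activity_dict))
      from rfl]
  beta_reduce
  rw [← List.foldl_map (f := activityKey) (g := fun (d : PySem.Dict String Int) k => if d.contains k = true then d.insert k (d.getD k 0 + 1) else d.insert k 1)]
  have hc := PySem.List.foldl_congr_mem
      (l := List.map activityKey l) (init := PySem.Dict.empty)
      (f := fun (d : PySem.Dict String Int) k =>
        if d.contains k = true then d.insert k (d.getD k 0 + 1) else d.insert k 1)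
      (g := fun (d : PySem.Dict String Int) k => d.insert k (d.getD k 0 + 1))
      (fun acc x _ => count_activity_step acc x)
  rw [hc, PySem.Dict.foldl_insert_getD_add_one_eq_counter, PySem.Dict.items_counter,
    PySem.List.dedup_eq_ofList]
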